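-- pv_equiv track=rewrite | github.com/winthebest/intelligent-news-assistant | src/reporter/run_reporter.py | _compute_period
-- ===== SOURCE A (Python) =====
-- from typing import Dict, List, Optional, Sequence, Tuple
--
-- def _compute_period(articles: Sequence[Dict]) -> Tuple[str, Optional[str], Optional[str]]:
--     """Return ``(human_string, oldest_iso, newest_iso)`` derived from
--     ``date_published``, or a "7 ngày gần nhất" fallback."""
--     dates: List[str] = [
--         a.get("date_published") for a in articles if a.get("date_published")
--     ]
--     if not dates:
--         return "7 ngày gần nhất", None, None
--     oldest = min(dates)
--     newest = max(dates)
--     if oldest == newest: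
--         return f"Ngày {oldest}", oldest, newest
--     return f"Từ {oldest} đến {newest}", oldest, newest
-- ===== SOURCE B (Python) =====
-- def _compute_period(articles):
--     bounds = None
--     for a in articles:
--         d = a.get("date_published")
--         if not d:
--             continue
--         if bounds is None:
--             bounds = (d, d)
--         else:
--             o, n = bounds
--             bounds = (d if d < o else o, d if d > n else n)
--     if bounds is None:
--         return "7 ngày gần nhất", None, None
--     oldest, newest = bounds
--     if oldest == newest:
--         return f"Ngày {oldest}", oldest, newest
--     return f"Từ {oldest} đến {newest}", oldest, newest
-- ===== Notes on version B (the rewrite author's own statement) =====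
-- stated objective: alternative
-- what changed: Replaced the intermediate dates list plus separate min() and max() passes with a single loop that maintains running oldest/newest variables and no intermediate list.
import Mathlib
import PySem

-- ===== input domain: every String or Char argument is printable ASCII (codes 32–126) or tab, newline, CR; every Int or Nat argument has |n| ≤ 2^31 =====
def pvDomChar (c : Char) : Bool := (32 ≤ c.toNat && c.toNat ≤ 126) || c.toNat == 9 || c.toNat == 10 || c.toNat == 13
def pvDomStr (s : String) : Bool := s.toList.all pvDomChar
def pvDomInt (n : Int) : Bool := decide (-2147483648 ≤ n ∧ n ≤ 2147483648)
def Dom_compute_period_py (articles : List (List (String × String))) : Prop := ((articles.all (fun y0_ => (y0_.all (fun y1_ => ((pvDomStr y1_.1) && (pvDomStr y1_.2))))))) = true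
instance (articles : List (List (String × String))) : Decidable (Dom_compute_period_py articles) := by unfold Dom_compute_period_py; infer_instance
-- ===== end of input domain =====

-- B replaces the dates list plus min()/max() passes by one loop with running oldest/newest (alternative decomposition, same cost class).

-- ===== PORT A =====
-- a.get("date_published"): first matching key in the association list
def pvGetDPA : List (String × String) → Option String
  | [] => none
  | (k, v) :: rest => if k = "date_published" then some v else pvGetDPA rest
-- the list comprehension [a.get("date_published") for a in articles if a.get("date_published")]
def pvDates (articles : List (List (String × String))) : List String :=
  articles.foldr
    (fun a acc =>
      match pvGetDPA a with
      | some s => if s = "" then acc else s :: acc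
      | none => acc) []

def compute_period_py (articles : List (List (String × String))) : String × Option String × Option String :=
  let dates := pvDates articles
  match PySem.List.min? dates (fun x => x), PySem.List.max? dates (fun x => x) with
  | some oldest, some newest =>
      if oldest = newest then ("Ngày " ++ oldest, some oldest, some newest)
      else ("Từ " ++ oldest ++ " đến " ++ newest, some oldest, some newest)
  | _, _ => ("7 ngày gần nhất", none, none)

-- ===== PORT B =====
-- a.get("date_published") on B's side (same dict lookup, duplicated so the ports stay independent)
def pvGetDPB : List (String × String) → Option String
  | [] => none
  | (k, v) :: rest => if k = "date_published" then some v else pvGetDPB rest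

-- the loop body of Source B: update the optional (oldest, newest) pair by one article
def pvStepB (bounds : Option (String × String)) (a : List (String × String)) :
    Option (String × String) :=
  match pvGetDPB a with
  | none => bounds
  | some d =>
    if d = "" then bounds
    else
      match bounds with
      | none => some (d, d)
      | some (o, n) => some ((if d < o then d else o), (if n < d then d else n))

def compute_period_py_alt (articles : List (List (String × String))) : String × Option String × Option String :=
  match articles.foldl pvStepB none with
  | none => ("7 ngày gần nhất", none, none)
  | some (oldest, newest) =>
      if oldest = newest then ("Ngày " ++ oldest, some oldest, some newest)
      else ("Từ " ++ oldest ++ " đến " ++ newest, some oldest, some newest)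

-- ===== PRECONDITION & SPEC =====
def Spec_compute_period_py (articles : List (List (String × String))) (out : String × Option String × Option String) : Prop := out = compute_period_py_alt articles
instance (articles : List (List (String × String))) (out : String × Option String × Option String) : Decidable (Spec_compute_period_py articles out) := by unfold Spec_compute_period_py; infer_instance

-- ===== CLAIM (what is proved, stated in full; the proofs are below) =====
def Claim_equal_compute_period_py : Prop := ∀ (articles : List (List (String × String))), Dom_compute_period_py articles → Spec_compute_period_py articles (compute_period_py articles)

-- ===== LEMMAS AND PROOFS =====

theorem pvGetDP_eq (a : List (String × String)) : pvGetDPA a = pvGetDPB a := by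
  induction a with
  | nil => rfl
  | cons p rest ih => cases p; simp [pvGetDPA, pvGetDPB, ih]

theorem pvDates_cons (a : List (String × String)) (rest : List (List (String × String))) :
    pvDates (a :: rest) =
      (match pvGetDPA a with
       | some s => if s = "" then pvDates rest else s :: pvDates rest
       | none => pvDates rest) := by
  simp only [pvDates, List.foldr]

theorem pvIf_min (d o : String) : (if d < o then d else o) = min o d := by
  by_cases h : d < o
  · rw [if_pos h, min_eq_right (le_of_lt h)]
  · rw [if_neg h, min_eq_left (not_lt.mp h)]

theorem pvIf_max (n d : String) : (if n < d then d else n) = max n d := by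
  by_cases h : n < d
  · rw [if_pos h, max_eq_right (le_of_lt h)]
  · rw [if_neg h, max_eq_left (not_lt.mp h)]

theorem pvLoopB_some (arts : List (List (String × String))) (o n : String) :
    arts.foldl pvStepB (some (o, n)) =
      some ((pvDates arts).foldl min o, (pvDates arts).foldl max n) := by
  induction arts generalizing o n with
  | nil => simp [pvDates]
  | cons a rest ih =>
    rw [List.foldl_cons, pvDates_cons, pvGetDP_eq a]
    cases hg : pvGetDPB a with
    | none => simpa [pvStepB, hg] using ih o n
    | some s =>
      by_cases hs : s = ""
      · simpa [pvStepB, hg, hs] using ih o n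
      · simp only [pvStepB, hg, if_neg hs, pvIf_min, pvIf_max, List.foldl_cons]
        exact ih (min o s) (max n s)

theorem pvLoopB_none (arts : List (List (String × String))) :
    arts.foldl pvStepB none =
      (match pvDates arts with
       | [] => none
       | d :: t => some (t.foldl min d, t.foldl max d)) := by
  induction arts with
  | nil => simp [pvDates]
  | cons a rest ih =>
    rw [List.foldl_cons, pvDates_cons, pvGetDP_eq a]
    cases hg : pvGetDPB a with
    | none => simpa [pvStepB, hg] using ih
    | some s =>
      by_cases hs : s = ""
      · simpa [pvStepB, hg, hs] using ih
      · simp only [pvStepB, hg, if_neg hs]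
        exact pvLoopB_some rest s s

-- ===== VERDICT (by name: the statement is the Claim_ definition above) =====
theorem compute_period_py_spec : Claim_equal_compute_period_py := by
  intro articles _
  show compute_period_py articles = compute_period_py_alt articles
  unfold compute_period_py compute_period_py_alt
  rw [pvLoopB_none]
  cases hd : pvDates articles with
  | nil => simp [PySem.List.min?, PySem.List.max?]
  | cons d t =>
    simp [PySem.List.min?_id_cons, PySem.List.max?_id_cons]
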